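-- pv_equiv track=rewrite | github.com/geckmf/PyCox | matrices.py | directsummat
-- ===== SOURCE A (Python) =====
-- def idmat(rng, scalar):
--     """returns the scalar matrix of size len(rng) with a given scalar
--     on the diagonal.
--
--     >>> idmat([0,1,2],-3)
--     [[-3, 0, 0], [0, -3, 0], [0, 0, -3]]
--     """
--     m = [len(rng) * [0] for x in rng]
--     for x in range(len(rng)):
--         m[x][x] = scalar
--     return m
--
-- def directsummat(a, b):
--     """returns the matrix direct sum of the matrices a and b.
--
--     >>> from coxeter import cartanmat
--     >>> c = directsummat(cartanmat("A",2),cartanmat("G",2)); c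
--     [[2, -1, 0, 0], [-1, 2, 0, 0], [0, 0, 2, -1], [0, 0, -3, 2]]
--     """
--     if not a:
--         return b
--     if not b:
--         return a
--     c = idmat(range(len(a[0]) + len(b[0])), 0)
--     for i in range(len(a[0])):
--         for j in range(len(a[0])):
--             c[i][j] = a[i][j]
--     for i in range(len(b[0])):
--         for j in range(len(b[0])):
--             c[len(a[0]) + i][len(a[0]) + j] = b[i][j]
--     return c
-- ===== SOURCE B (Python) =====
-- def directsummat(a, b):
--     """Matrix direct sum, built row by row (pad each a-row right, each b-row left)."""
--     if not a:
--         return b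
--     if not b:
--         return a
--     na, nb = len(a[0]), len(b[0])
--     return [[a[i][j] for j in range(na)] + [0] * nb for i in range(na)] \
--          + [[0] * na + [b[i][j] for j in range(nb)] for i in range(nb)]
-- ===== Notes on version B (the rewrite author's own statement) =====
-- stated objective: simpler
-- what changed: Instead of preallocating a zero matrix via idmat and overwriting it cell by cell with index assignments, B builds the result row by row by concatenating each block row with zero padding.
import Mathlib
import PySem

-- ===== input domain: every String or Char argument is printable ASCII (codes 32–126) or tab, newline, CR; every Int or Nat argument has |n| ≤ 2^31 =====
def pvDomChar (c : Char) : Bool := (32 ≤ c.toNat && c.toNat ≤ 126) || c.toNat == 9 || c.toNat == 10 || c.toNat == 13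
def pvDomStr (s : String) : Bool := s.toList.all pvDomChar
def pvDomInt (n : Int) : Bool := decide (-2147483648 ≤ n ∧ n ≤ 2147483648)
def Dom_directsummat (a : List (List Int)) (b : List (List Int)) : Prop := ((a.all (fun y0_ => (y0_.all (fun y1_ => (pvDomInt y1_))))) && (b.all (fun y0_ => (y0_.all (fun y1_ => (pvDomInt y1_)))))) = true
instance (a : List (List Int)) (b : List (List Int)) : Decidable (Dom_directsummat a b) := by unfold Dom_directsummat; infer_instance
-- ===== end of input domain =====

-- B replaces A's preallocate-a-zero-matrix-then-overwrite-cells approach by building the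
-- result row by row (block row plus zero padding); objective: simpler.


-- ===== PORT A =====
-- idmat(rng, scalar): rng is only consulted through len(rng), so the port takes the size n.
def idmatP (n : Nat) (scalar : Int) : List (List Int) :=
  (List.range n).foldl
    (fun m x => m.set x ((m.getD x []).set x scalar))
    ((List.range n).map (fun _ => List.replicate n (0 : Int)))

-- Python indexing a[i][j] is ported with getD; Pre_directsummat excludes exactly the inputs
-- where the Python raises IndexError, so the default is never claimed about.
def directsummat (a : List (List Int)) (b : List (List Int)) : List (List Int) :=
  if a = [] then b
  else if b = [] then a
  else
    let na := (a.headD []).length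
    let nb := (b.headD []).length
    let c0 := idmatP (na + nb) 0
    let c1 := (List.range na).foldl
      (fun c i => (List.range na).foldl
        (fun c j => c.set i ((c.getD i []).set j ((a.getD i []).getD j 0))) c) c0
    (List.range nb).foldl
      (fun c i => (List.range nb).foldl
        (fun c j => c.set (na + i) ((c.getD (na + i) []).set (na + j) ((b.getD i []).getD j 0))) c) c1

-- ===== PORT B =====
def directsummat_alt (a : List (List Int)) (b : List (List Int)) : List (List Int) :=
  if a = [] then b
  else if b = [] then a
  else
    let na := (a.headD []).length
    let nb := (b.headD []).length
    ((List.range na).map (fun i =>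
        (List.range na).map (fun j => (a.getD i []).getD j 0) ++ List.replicate nb 0)) ++
    ((List.range nb).map (fun i =>
        List.replicate na 0 ++ (List.range nb).map (fun j => (b.getD i []).getD j 0)))

-- ===== PRECONDITION & SPEC =====
-- Pre_ excludes exactly the inputs where Python A raises IndexError (a or b, nonempty, has
-- fewer rows than len(·[0]) or a too-short row among the first len(·[0]) rows); B raises there too.
def Pre_directsummat (a : List (List Int)) (b : List (List Int)) : Prop :=
  a = [] ∨ b = [] ∨
  (((a.headD []).length ≤ a.length ∧
      ∀ r ∈ a.take (a.headD []).length, (a.headD []).length ≤ r.length) ∧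
   ((b.headD []).length ≤ b.length ∧
      ∀ r ∈ b.take (b.headD []).length, (b.headD []).length ≤ r.length))
instance (a : List (List Int)) (b : List (List Int)) : Decidable (Pre_directsummat a b) := by
  unfold Pre_directsummat; infer_instance

def pvWitness_directsummat : List (List Int) × List (List Int) :=
  ([[2, -1], [-1, 2]], [[2, -1], [-3, 2]])

def Spec_directsummat (a : List (List Int)) (b : List (List Int)) (out : List (List Int)) : Prop := out = directsummat_alt a b
instance (a : List (List Int)) (b : List (List Int)) (out : List (List Int)) : Decidable (Spec_directsummat a b out) := by unfold Spec_directsummat; infer_instance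

-- ===== CLAIM (what is proved, stated in full; the proofs are below) =====
def Claim_equal_directsummat : Prop := ∀ (a : List (List Int)) (b : List (List Int)), Dom_directsummat a b → Pre_directsummat a b → Spec_directsummat a b (directsummat a b)

-- ===== LEMMAS AND PROOFS =====

-- A foldl whose step fixes the accumulator leaves it unchanged.
theorem pv_foldl_fixed {α β : Type} {f : β → α → β} {c : β} :
    ∀ {l : List α}, (∀ x ∈ l, f c x = f c x ∧ f c x = c) → l.foldl f c = c := by
  intro l h
  induction l with
  | nil => rfl
  | cons x xs ih =>
      simp only [List.foldl_cons]
      rw [(h x (by simp)).2]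
      exact ih (fun y hy => h y (by simp [hy]))

-- The scalar-0 identity matrix of A is just the all-zero matrix.
theorem idmatP_zero (n : Nat) :
    idmatP n 0 = List.replicate n (List.replicate n (0 : Int)) := by
  unfold idmatP
  have hmap : (List.range n).map (fun _ => List.replicate n (0 : Int))
      = List.replicate n (List.replicate n (0 : Int)) := by
    simp
  rw [hmap]
  apply pv_foldl_fixed
  intro x hx
  have hx' : x < n := List.mem_range.mp hx
  constructor
  · rfl
  · have h1 : (List.replicate n (List.replicate n (0 : Int))).getD x [] = List.replicate n (0 : Int) :=
      List.getD_replicate _ hx'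
    have h2 : (List.replicate n (0 : Int)).set x 0 = List.replicate n (0 : Int) := by
      have : (List.replicate n (0 : Int))[x]'(by simpa using hx') = 0 := by simp
      calc (List.replicate n (0 : Int)).set x 0
          = (List.replicate n (0 : Int)).set x ((List.replicate n (0 : Int))[x]'(by simpa using hx')) := by rw [this]
        _ = List.replicate n (0 : Int) := List.set_getElem_self _
    rw [h1, h2]
    have : (List.replicate n (List.replicate n (0 : Int)))[x]'(by simpa using hx')
        = List.replicate n (0 : Int) := by simp
    calc (List.replicate n (List.replicate n (0 : Int))).set x (List.replicate n (0 : Int))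
        = (List.replicate n (List.replicate n (0 : Int))).set x
            ((List.replicate n (List.replicate n (0 : Int)))[x]'(by simpa using hx')) := by rw [this]
      _ = _ := List.set_getElem_self _

-- An inner loop that only reads and writes row i commutes with extracting that row.
theorem pv_inner {i : Nat} {t : List Int → Nat → List Int} :
    ∀ (l : List Nat) (c : List (List Int)),
      l.foldl (fun c j => c.set i (t (c.getD i []) j)) c
        = c.set i (l.foldl t (c.getD i [])) := by
  intro l
  induction l with
  | nil =>
      intro c
      by_cases h : i < c.length
      · simp [List.getD_eq_getElem?_getD, List.getElem?_eq_getElem h, List.set_getElem_self]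
      · rw [List.set_eq_of_length_le (by omega)]
        rfl
  | cons j l ih =>
      intro c
      simp only [List.foldl_cons]
      rw [ih]
      by_cases h : i < c.length
      · have hg : ((c.set i (t (c.getD i []) j)).getD i []) = t (c.getD i []) j := by
          simp [List.getD_eq_getElem?_getD, List.getElem?_set_self h]
        rw [hg, List.set_set]
      · have hnoop : ∀ (X : List Int), c.set i X = c := fun X =>
          List.set_eq_of_length_le (by omega)
        simp only [hnoop]

-- Writing v 0 … v (n-1) at offsets k … k+n-1 of a long-enough row.
theorem pv_rowfold (v : Nat → Int) (k : Nat) :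
    ∀ (n : Nat) (r : List Int), k + n ≤ r.length →
      (List.range n).foldl (fun r j => r.set (k + j) (v j)) r
        = r.take k ++ (List.range n).map v ++ r.drop (k + n) := by
  intro n
  induction n with
  | zero => intro r h; simp
  | succ n ih =>
      intro r h
      rw [List.range_succ, List.foldl_append, ih r (by omega)]
      have hlen : (r.take k ++ (List.range n).map v).length = k + n := by
        simp [Nat.min_eq_left (by omega : k ≤ r.length)]
      simp only [List.foldl_cons, List.foldl_nil]
      rw [List.set_append_right _ _ (le_of_eq hlen), hlen, Nat.sub_self]
      have hdrop : r.drop (k + n) = getElem r (k + n) (by omega) :: r.drop (k + n + 1) :=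
        List.drop_eq_getElem_cons (by omega)
      rw [hdrop]
      simp
      rw [hdrop]
      rfl

-- Writing rows F 0 … F (n-1) (each computed from the row being replaced) at offsets k … .
theorem pv_matfold (F : Nat → List Int → List Int) (k : Nat) :
    ∀ (n : Nat) (c : List (List Int)), k + n ≤ c.length →
      (List.range n).foldl (fun c i => c.set (k + i) (F i (c.getD (k + i) []))) c
        = c.take k ++ (List.range n).map (fun i => F i (c.getD (k + i) [])) ++ c.drop (k + n) := by
  intro n
  induction n with
  | zero => intro c h; simp
  | succ n ih =>
      intro c h
      rw [List.range_succ, List.foldl_append, ih c (by omega)]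
      have hk : k ≤ c.length := by omega
      have hlen : (c.take k ++ (List.range n).map (fun i => F i (c.getD (k + i) []))).length
          = k + n := by
        simp [Nat.min_eq_left hk]
      simp only [List.foldl_cons, List.foldl_nil]
      have hget : ((c.take k ++ (List.range n).map (fun i => F i (c.getD (k + i) []))
            ++ c.drop (k + n)).getD (k + n) []) = c.getD (k + n) [] := by
        rw [List.getD_append_right _ _ _ _ (le_of_eq hlen), hlen, Nat.sub_self]
        simp [List.getD_eq_getElem?_getD, List.getElem?_drop]
      rw [hget, List.set_append_right _ _ (le_of_eq hlen), hlen, Nat.sub_self]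
      have hdrop : c.drop (k + n) = getElem c (k + n) (by omega) :: c.drop (k + n + 1) :=
        List.drop_eq_getElem_cons (by omega)
      have hgd : c.getD (k + n) [] = getElem c (k + n) (by omega : k + n < c.length) := by
        rw [List.getD_eq_getElem?_getD, List.getElem?_eq_getElem (by omega : k + n < c.length)]
        rfl
      rw [hdrop]
      simp
      rw [hdrop]
      rfl

theorem directsummat_eq_alt (a b : List (List Int)) :
    directsummat a b = directsummat_alt a b := by
  unfold directsummat directsummat_alt
  by_cases ha : a = []
  · simp [ha]
  by_cases hb : b = []
  · simp [ha, hb]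
  simp only [ha, hb, if_false]
  set na := (a.headD []).length with hna
  set nb := (b.headD []).length with hnb
  set zrow := List.replicate (na + nb) (0 : Int) with hzrow
  -- Step 1: the initial matrix is all zeros.
  rw [idmatP_zero (na + nb)]
  -- Step 2: rewrite the inner column loops via pv_inner.
  have hinner1 : (fun (c : List (List Int)) (i : Nat) => (List.range na).foldl
        (fun c j => c.set i ((c.getD i []).set j ((a.getD i []).getD j 0))) c)
      = (fun c i => c.set i ((List.range na).foldl
        (fun r j => r.set j ((a.getD i []).getD j 0)) (c.getD i []))) := by
    funext c i
    exact pv_inner (t := fun r j => r.set j ((a.getD i []).getD j 0)) (List.range na) c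
  have hinner2 : (fun (c : List (List Int)) (i : Nat) => (List.range nb).foldl
        (fun c j => c.set (na + i) ((c.getD (na + i) []).set (na + j) ((b.getD i []).getD j 0))) c)
      = (fun c i => c.set (na + i) ((List.range nb).foldl
        (fun r j => r.set (na + j) ((b.getD i []).getD j 0)) (c.getD (na + i) []))) := by
    funext c i
    exact pv_inner (t := fun r j => r.set (na + j) ((b.getD i []).getD j 0)) (List.range nb) c
  rw [hinner1, hinner2]
  -- Step 3: first block of row writes (offset 0).
  have hm1 := pv_matfold
      (F := fun i r => (List.range na).foldl (fun r j => r.set j ((a.getD i []).getD j 0)) r)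
      (k := 0) na (List.replicate (na + nb) zrow) (by simp)
  simp only [Nat.zero_add, List.take_zero, List.nil_append] at hm1
  rw [hm1]
  have hrows1 : (List.range na).map (fun i => (List.range na).foldl
        (fun r j => r.set j ((a.getD i []).getD j 0)) ((List.replicate (na + nb) zrow).getD i []))
      = (List.range na).map (fun i =>
        (List.range na).map (fun j => (a.getD i []).getD j 0) ++ List.replicate nb 0) := by
    apply List.map_congr_left
    intro i hi
    have hi' : i < na := List.mem_range.mp hi
    rw [List.getD_replicate _ (by omega)]
    have := pv_rowfold (fun j => (a.getD i []).getD j 0) 0 na zrow (by simp [hzrow])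
    simp only [Nat.zero_add, List.take_zero, List.nil_append] at this
    rw [this, hzrow, List.drop_replicate, Nat.add_sub_cancel_left]
  rw [hrows1, List.drop_replicate]
  have hnb' : na + nb - na = nb := by omega
  rw [hnb']
  -- Step 4: second block of row writes (offset na).
  set rowsA := (List.range na).map (fun i =>
      (List.range na).map (fun j => (a.getD i []).getD j 0) ++ List.replicate nb 0) with hrowsA
  have hlenA : rowsA.length = na := by simp [hrowsA]
  have hm2 := pv_matfold
      (F := fun i r => (List.range nb).foldl (fun r j => r.set (na + j) ((b.getD i []).getD j 0)) r)
      (k := na) nb (rowsA ++ List.replicate nb zrow) (by simp [hlenA])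
  rw [hm2]
  have hgetB : ∀ i, i < nb →
      ((rowsA ++ List.replicate nb zrow).getD (na + i) []) = zrow := by
    intro i hi
    rw [List.getD_append_right _ _ _ _ (by omega), hlenA]
    have : na + i - na = i := by omega
    rw [this, List.getD_replicate _ hi]
  have hrows2 : (List.range nb).map (fun i => (List.range nb).foldl
        (fun r j => r.set (na + j) ((b.getD i []).getD j 0))
        ((rowsA ++ List.replicate nb zrow).getD (na + i) []))
      = (List.range nb).map (fun i =>
        List.replicate na 0 ++ (List.range nb).map (fun j => (b.getD i []).getD j 0)) := by
    apply List.map_congr_left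
    intro i hi
    have hi' : i < nb := List.mem_range.mp hi
    rw [hgetB i hi']
    rw [pv_rowfold (fun j => (b.getD i []).getD j 0) na nb zrow (by simp [hzrow])]
    rw [hzrow]
    simp [List.take_replicate, List.drop_replicate]
  rw [hrows2]
  -- Step 5: assemble.
  have htake : (rowsA ++ List.replicate nb zrow).take na = rowsA := by
    rw [← hlenA]; exact List.take_left
  have hdrop : (rowsA ++ List.replicate nb zrow).drop (na + nb) = [] := by
    apply List.drop_eq_nil_of_le
    simp [hlenA]
  rw [htake, hdrop, List.append_nil]

-- ===== VERDICT (by name: the statement is the Claim_ definition above) =====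
theorem directsummat_spec : Claim_equal_directsummat := by
  intro a b _ _
  unfold Spec_directsummat
  exact directsummat_eq_alt a b
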